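-- pv_equiv track=rewrite | github.com/kalebmacedo/Matem-tica-Discreta-2---C-digos-.py | md2/Aritmética Modular/questao8.py | gerar_matriz_zn
-- ===== SOURCE A (Python) =====
-- def gerar_matriz_zn(tamanho):
--     matriz = []
--     for x in range(tamanho):
--         linha = []
--         for y in range(tamanho):
--             resultado = (x * y) % tamanho
--             linha.append(resultado)
--         matriz.append(linha)
--     return matriz
-- ===== SOURCE B (Python) =====
-- def gerar_matriz_zn(tamanho):
--     # Row x+1 is row x shifted by the identity row: row[x+1][y] = (row[x][y] + y) % n.
--     # So keep one current row and derive each next row by zipping with the base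
--     # row [0, 1, ..., n-1]; no multiplication is ever performed.
--     base = list(range(tamanho))
--     matriz = []
--     row = [0] * tamanho
--     for _ in range(tamanho):
--         matriz.append(row)
--         row = [(r + y) % tamanho for r, y in zip(row, base)]
--     return matriz
-- ===== Notes on version B (the rewrite author's own statement) =====
-- stated objective: alternative
-- what changed: B keeps a single current row and derives each successive row by zipping the previous row with the base row [0..n-1] and reducing mod n (row[x+1][y]=(row[x][y]+y)%n), so no multiplication is performed anywhere; A recomputes (x*y)%n per cell with nested loops.
import Mathlib
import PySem

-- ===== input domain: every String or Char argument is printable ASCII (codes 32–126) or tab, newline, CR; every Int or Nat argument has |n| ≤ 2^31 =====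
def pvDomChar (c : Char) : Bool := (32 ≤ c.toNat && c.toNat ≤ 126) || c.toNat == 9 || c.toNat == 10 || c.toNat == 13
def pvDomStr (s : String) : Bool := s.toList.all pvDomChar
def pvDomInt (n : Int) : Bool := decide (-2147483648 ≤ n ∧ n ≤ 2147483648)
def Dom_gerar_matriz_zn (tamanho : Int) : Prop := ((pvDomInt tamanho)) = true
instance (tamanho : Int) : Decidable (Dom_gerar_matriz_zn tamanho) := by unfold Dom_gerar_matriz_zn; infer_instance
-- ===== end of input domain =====

-- B derives each row from the previous one by zipping with the base row [0..n-1] mod n (no multiplication); return values proved equal.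

-- ===== PORT A =====
-- literal port of A: for x in range(n): linha = [] ; for y in range(n): linha.append((x*y)%n) ; matriz.append(linha)
def gerar_matriz_zn (tamanho : Int) : List (List Int) :=
  (PySem.List.pyRange 0 tamanho 1).foldl
    (fun matriz x =>
      matriz ++ [(PySem.List.pyRange 0 tamanho 1).foldl
        (fun linha y => linha ++ [PySem.Int.mod (x * y) tamanho]) []])
    []

-- ===== PORT B =====
-- B's loop body: emit the current row, then the next row is zip of it with base, mod n
def gerarRows (t : Int) (base : List Int) : Nat → List Int → List (List Int)
  | 0, _ => []
  | n + 1, row => row :: gerarRows t base n (List.zipWith (fun r y => PySem.Int.mod (r + y) t) row base)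

-- literal port of B: base = range(n); row = [0]*n; n times: append row; row = zipWith (+y) mod n
def gerar_matriz_zn_alt (tamanho : Int) : List (List Int) :=
  gerarRows tamanho (PySem.List.pyRange 0 tamanho 1) tamanho.toNat
    (List.replicate tamanho.toNat 0)

-- ===== PRECONDITION & SPEC =====
def Spec_gerar_matriz_zn (tamanho : Int) (out : List (List Int)) : Prop := out = gerar_matriz_zn_alt tamanho
instance (tamanho : Int) (out : List (List Int)) : Decidable (Spec_gerar_matriz_zn tamanho out) := by unfold Spec_gerar_matriz_zn; infer_instance

-- ===== CLAIM =====
def Claim_equal_gerar_matriz_zn : Prop := ∀ (tamanho : Int), Dom_gerar_matriz_zn tamanho → Spec_gerar_matriz_zn tamanho (gerar_matriz_zn tamanho)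

-- ===== LEMMAS AND PROOFS =====

-- floor-mod absorbs an inner floor-mod on the left of a sum
lemma mod_add_mod_left (a y t : Int) (ht : 0 < t) :
    PySem.Int.mod (PySem.Int.mod a t + y) t = PySem.Int.mod (a + y) t := by
  simp only [PySem.Int.mod_eq_emod_of_pos ht]
  rw [Int.add_emod, Int.emod_emod_of_dvd _ dvd_rfl, ← Int.add_emod]

-- zipping a mapped copy of a list with the list itself is a single map
lemma zipWith_map_self {α β γ : Type} (g : β → α → γ) (f : α → β) (l : List α) :
    List.zipWith g (l.map f) l = l.map (fun a => g (f a) a) := by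
  induction l with
  | nil => rfl
  | cons a l ih => simp [ih]

-- invariant of B's loop: starting from the row of multiples of x, gerarRows
-- produces the rows of multiples of x, x+1, …, x+n-1
lemma gerarRows_invariant (t : Int) (ht : 0 < t) (n : Nat) :
    ∀ (x : Int),
    gerarRows t (PySem.List.pyRange 0 t 1) n
      ((PySem.List.pyRange 0 t 1).map (fun y => PySem.Int.mod (x * y) t))
    = (List.range n).map
        (fun (k : Nat) => (PySem.List.pyRange 0 t 1).map (fun y => PySem.Int.mod ((x + (k : Int)) * y) t)) := by
  induction n with
  | zero => intro x; rfl
  | succ n ih =>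
      intro x
      rw [List.range_succ_eq_map, List.map_cons, List.map_map]
      show _ :: gerarRows t _ n _ = _
      congr 1
      · push_cast; ring_nf
      · rw [zipWith_map_self]
        have h : ((PySem.List.pyRange 0 t 1).map
            (fun y => PySem.Int.mod (PySem.Int.mod (x * y) t + y) t))
            = (PySem.List.pyRange 0 t 1).map (fun y => PySem.Int.mod ((x + 1) * y) t) := by
          apply List.map_congr_left
          intro y _
          rw [mod_add_mod_left _ _ _ ht]
          congr 1; ring
        rw [h, ih (x + 1)]
        apply List.map_congr_left
        intro k _
        have : x + 1 + (k : Int) = x + ((k + 1 : Nat) : Int) := by push_cast; ring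
        rw [this]
        simp [Function.comp]

-- the all-zeros starting row is the row of multiples of 0
lemma replicate_eq_row_zero (t : Int) (ht : 0 < t) :
    List.replicate t.toNat (0 : Int)
    = (PySem.List.pyRange 0 t 1).map (fun y => PySem.Int.mod (0 * y) t) := by
  have hmap : (PySem.List.pyRange 0 t 1).map (fun y => PySem.Int.mod (0 * y) t)
      = (PySem.List.pyRange 0 t 1).map (fun _ => (0 : Int)) := by
    apply List.map_congr_left
    intro y _
    rw [zero_mul, PySem.Int.mod_eq_emod_of_pos ht]; simp
  rw [hmap, List.map_const', PySem.List.length_pyRange_one]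
  norm_num

-- ===== VERDICT =====
theorem gerar_matriz_zn_spec : Claim_equal_gerar_matriz_zn := by
  intro t _
  unfold Spec_gerar_matriz_zn gerar_matriz_zn gerar_matriz_zn_alt
  by_cases ht : 0 < t
  · rw [replicate_eq_row_zero t ht, gerarRows_invariant t ht t.toNat 0,
        PySem.List.foldl_append_singleton_eq_map, PySem.List.pyRange_zero, List.map_map]
    apply List.map_congr_left
    intro k _
    simp only [Function.comp_apply]
    rw [PySem.List.foldl_append_singleton_eq_map]
    simp
  · have h0 : t.toNat = 0 := by omega
    have hr : PySem.List.pyRange 0 t 1 = [] := by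
      rw [PySem.List.pyRange_one]; simp; omega
    rw [h0, hr]; rfl
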